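-- pv_equiv track=rewrite | github.com/calebellenberg/hackAtBrown2026 | backend/memory.py | _simple_append_update
-- ===== SOURCE A (Python) =====
-- def _simple_append_update(current_content: str, new_observation: str, target_file: str) -> str:
--     """
--     Simple fallback method to append observation without Gemini refinement.
--     Handles placeholders and limits entries.
--
--     Args:
--         current_content: Current file content
--         new_observation: New observation to add
--         target_file: Name of target file
--
--     Returns:
--         Updated content
--     """
--     # Handle placeholder case - replace it with first observation
--     if "[No patterns recorded yet]" in current_content:
--         return current_content.replace(
--             "- [No patterns recorded yet]",
--             f"- {new_observation}"
--         )
--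
--     # Count existing observations
--     lines = current_content.split('\n')
--     behavior_count = 0
--     in_behavior_section = False
--     for line in lines:
--         if "## Observed Behaviors" in line:
--             in_behavior_section = True
--         elif line.startswith('##') and in_behavior_section:
--             break
--         elif in_behavior_section and line.strip().startswith('- ') and '[No patterns recorded yet]' not in line:
--             behavior_count += 1
--
--     # Only append if less than 5 observations
--     if behavior_count < 5:
--         if "## Observed Behaviors" in current_content:
--             # Find the section and append after it
--             lines = current_content.split('\n')
--             new_lines = []
--             appended = False
--             for i, line in enumerate(lines):
--                 new_lines.append(line)
--                 if "## Observed Behaviors" in line and not appended: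
--                     # Append after the header
--                     new_lines.append(f"- {new_observation}")
--                     appended = True
--             return '\n'.join(new_lines)
--         else:
--             return current_content + f"\n\n## Observed Behaviors\n- {new_observation}\n"
--     else:
--         # Too many entries, return original
--         return current_content
-- ===== SOURCE B (Python) =====
-- def _simple_append_update(current_content: str, new_observation: str, target_file: str) -> str:
--     # Placeholder case: replace it with the first observation (same as A).
--     if "[No patterns recorded yet]" in current_content:
--         return current_content.replace(
--             "- [No patterns recorded yet]",
--             f"- {new_observation}"
--         )
--
--     lines = current_content.split('\n')
--     # Locate the first header line once, instead of flag-driven passes.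
--     header_index = next(
--         (i for i, line in enumerate(lines) if "## Observed Behaviors" in line),
--         None
--     )
--     if header_index is None:
--         return current_content + f"\n\n## Observed Behaviors\n- {new_observation}\n"
--
--     # Count observation bullets in the section right after the header.
--     count = 0
--     for line in lines[header_index + 1:]:
--         if "## Observed Behaviors" in line:
--             continue
--         if line.startswith('##'):
--             break
--         if line.strip().startswith('- '):
--             count += 1
--
--     if count < 5:
--         lines.insert(header_index + 1, f"- {new_observation}")
--         return '\n'.join(lines)
--     return current_content
-- ===== Notes on version B (the rewrite author's own statement) =====
-- stated objective: simpler
-- what changed: A's two flag-driven passes (a count loop with in_behavior_section/break state and a rebuild loop with an appended flag over all lines) are replaced by locating the header index once, counting over the slice after it, and a single list.insert at header_index+1.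
import Mathlib
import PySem

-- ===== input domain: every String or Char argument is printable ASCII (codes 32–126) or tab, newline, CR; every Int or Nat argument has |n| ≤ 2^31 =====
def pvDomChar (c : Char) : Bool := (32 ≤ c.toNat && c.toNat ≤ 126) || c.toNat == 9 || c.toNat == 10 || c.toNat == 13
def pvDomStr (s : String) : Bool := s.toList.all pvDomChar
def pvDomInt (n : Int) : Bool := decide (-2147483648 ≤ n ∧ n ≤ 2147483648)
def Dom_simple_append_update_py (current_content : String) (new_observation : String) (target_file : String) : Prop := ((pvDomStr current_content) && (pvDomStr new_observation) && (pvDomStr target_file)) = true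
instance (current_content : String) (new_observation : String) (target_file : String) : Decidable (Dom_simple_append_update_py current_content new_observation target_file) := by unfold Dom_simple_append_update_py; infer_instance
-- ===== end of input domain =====

-- B replaces A's flag-driven count/rebuild loops by a single find-the-header-index pass, a slice count and one list insert (objective: simpler).

-- ===== PORT A =====
-- shared string literals (as char lists)
def pvHdr : List Char := "## Observed Behaviors".toList
def pvPh : List Char := "[No patterns recorded yet]".toList
def pvHash : List Char := "##".toList
def pvDash : List Char := "- ".toList

-- A's counting loop: state (count, in_behavior_section), `break` = return count
def pvCountA : List (List Char) → Nat → Bool → Nat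
  | [], cnt, _ => cnt
  | l :: rest, cnt, inSec =>
    if PySem.Chars.isIn pvHdr l then pvCountA rest cnt true
    else if PySem.Chars.startswith l pvHash && inSec then cnt
    else if inSec && PySem.Chars.startswith (PySem.Chars.strip l) pvDash && !(PySem.Chars.isIn pvPh l) then
      pvCountA rest (cnt + 1) inSec
    else pvCountA rest cnt inSec

-- A's rebuild loop body: state (new_lines, appended)
def pvStepA (x : List Char) (st : List (List Char) × Bool) (line : List Char) : List (List Char) × Bool :=
  let nl := st.1 ++ [line]
  if PySem.Chars.isIn pvHdr line && !st.2 then (nl ++ [x], true) else (nl, st.2)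

def simple_append_update_py (current_content : String) (new_observation : String) (target_file : String) : String :=
  if PySem.Str.isIn "[No patterns recorded yet]" current_content then
    PySem.Str.replace current_content "- [No patterns recorded yet]" ("- " ++ new_observation)
  else
    let lines := PySem.Chars.splitOn current_content.toList ['\n']
    let cnt := pvCountA lines 0 false
    if cnt < 5 then
      if PySem.Str.isIn "## Observed Behaviors" current_content then
        let r := lines.foldl (pvStepA (pvDash ++ new_observation.toList)) ([], false)
        String.ofList (PySem.Chars.join ['\n'] r.1)
      else
        current_content ++ "\n\n## Observed Behaviors\n- " ++ new_observation ++ "\n"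
    else current_content

-- ===== PORT B =====
-- B's counting loop over the slice after the header: `continue` on header lines, `break` on '##'
def pvCountB : List (List Char) → Nat
  | [] => 0
  | l :: rest =>
    if PySem.Chars.isIn pvHdr l then pvCountB rest
    else if PySem.Chars.startswith l pvHash then 0
    else if PySem.Chars.startswith (PySem.Chars.strip l) pvDash then 1 + pvCountB rest
    else pvCountB rest

def simple_append_update_py_alt (current_content : String) (new_observation : String) (target_file : String) : String :=
  if PySem.Str.isIn "[No patterns recorded yet]" current_content then
    PySem.Str.replace current_content "- [No patterns recorded yet]" ("- " ++ new_observation)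
  else
    let lines := PySem.Chars.splitOn current_content.toList ['\n']
    match lines.findIdx? (fun l => PySem.Chars.isIn pvHdr l) with
    | none => current_content ++ "\n\n## Observed Behaviors\n- " ++ new_observation ++ "\n"
    | some i =>
      if pvCountB (lines.drop (i + 1)) < 5 then
        String.ofList (PySem.Chars.join ['\n']
          (PySem.List.insert lines ((i : Int) + 1) (pvDash ++ new_observation.toList)))
      else current_content

-- ===== PRECONDITION & SPEC =====
def Spec_simple_append_update_py (current_content : String) (new_observation : String) (target_file : String) (out : String) : Prop := out = simple_append_update_py_alt current_content new_observation target_file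
instance (current_content : String) (new_observation : String) (target_file : String) (out : String) : Decidable (Spec_simple_append_update_py current_content new_observation target_file out) := by unfold Spec_simple_append_update_py; infer_instance

-- ===== CLAIM (what is proved, stated in full; the proofs are below) =====
def Claim_equal_simple_append_update_py : Prop := ∀ (current_content : String) (new_observation : String) (target_file : String), Dom_simple_append_update_py current_content new_observation target_file → Spec_simple_append_update_py current_content new_observation target_file (simple_append_update_py current_content new_observation target_file)

-- ===== LEMMAS AND PROOFS =====

def pvSplitNl : List Char → List (List Char)
  | [] => [[]]
  | c :: rest => if c = '\n' then [] :: pvSplitNl rest else (pvSplitNl rest).modifyHead (c :: ·)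

theorem pvSplitNl_ne_nil (s : List Char) : pvSplitNl s ≠ [] := by
  induction s with
  | nil => simp [pvSplitNl]
  | cons c rest ih =>
    simp only [pvSplitNl]
    split
    · simp
    · cases h : pvSplitNl rest with
      | nil => exact absurd h ih
      | cons a t => simp [h]

theorem pv_go_eq (fuel : Nat) : ∀ (l cur : List Char) (acc : List (List Char)), l.length < fuel →
    PySem.Chars.splitOn.go ['\n'] fuel l cur acc = acc.reverse ++ (pvSplitNl l).modifyHead (cur.reverse ++ ·) := by
  induction fuel with
  | zero => intro l cur acc h; omega
  | succ n ih =>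
    intro l cur acc h
    cases l with
    | nil => simp [PySem.Chars.splitOn.go, pvSplitNl]
    | cons c rest =>
      have hmod : ∀ (L : List (List Char)), List.modifyHead (fun x => x) L = L := by
        intro L; cases L <;> simp
      by_cases hc : c = '\n'
      · subst hc
        rw [show PySem.Chars.splitOn.go ['\n'] (n + 1) ('\n' :: rest) cur acc =
              PySem.Chars.splitOn.go ['\n'] n rest [] (cur.reverse :: acc) from by
            simp [PySem.Chars.splitOn.go, List.isPrefixOf]]
        rw [ih rest [] (cur.reverse :: acc) (by simp at h; omega)]
        simp [pvSplitNl, hmod]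
      · rw [show PySem.Chars.splitOn.go ['\n'] (n + 1) (c :: rest) cur acc =
              PySem.Chars.splitOn.go ['\n'] n rest (c :: cur) acc from by
            simp [PySem.Chars.splitOn.go, List.isPrefixOf, Ne.symm hc]]
        rw [ih rest (c :: cur) acc (by simp at h; omega)]
        simp only [pvSplitNl, if_neg hc]
        cases hr : pvSplitNl rest with
        | nil => exact absurd hr (pvSplitNl_ne_nil rest)
        | cons a t => simp

theorem pv_splitOn_eq (s : List Char) : PySem.Chars.splitOn s ['\n'] = pvSplitNl s := by
  unfold PySem.Chars.splitOn
  rw [pv_go_eq (s.length + 1) s [] [] (by omega)]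
  cases h : pvSplitNl s with
  | nil => exact absurd h (pvSplitNl_ne_nil s)
  | cons a t => simp [h]

theorem pv_head_prefix : ∀ (s h0 : List Char) (t : List (List Char)), pvSplitNl s = h0 :: t → h0 <+: s := by
  intro s
  induction s with
  | nil => intro h0 t h; simp [pvSplitNl] at h; simp [h.1]
  | cons c rest ih =>
    intro h0 t h
    simp only [pvSplitNl] at h
    by_cases hc : c = '\n'
    · rw [if_pos hc] at h
      cases h; exact List.nil_prefix
    · rw [if_neg hc] at h
      cases hr : pvSplitNl rest with
      | nil => exact absurd hr (pvSplitNl_ne_nil rest)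
      | cons a t' =>
        rw [hr] at h
        simp at h
        obtain ⟨rfl, rfl⟩ := h
        exact (List.prefix_cons_inj c).2 (ih a t' hr)

theorem pv_mem_infix {l : List Char} {s : List Char} (h : l ∈ pvSplitNl s) : l <:+: s := by
  induction s generalizing l with
  | nil => simp [pvSplitNl] at h; simp [h]
  | cons c rest ih =>
    simp only [pvSplitNl] at h
    by_cases hc : c = '\n'
    · rw [if_pos hc] at h
      rcases List.mem_cons.1 h with rfl | h2
      · exact List.nil_infix
      · exact List.infix_cons (ih h2)
    · rw [if_neg hc] at h
      cases hr : pvSplitNl rest with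
      | nil => exact absurd hr (pvSplitNl_ne_nil rest)
      | cons a t =>
        rw [hr] at h
        rcases List.mem_cons.1 h with rfl | h2
        · have ha : a <+: rest := pv_head_prefix rest a t hr
          exact ((List.prefix_cons_inj c).mpr ha).isInfix
        · exact List.infix_cons (ih (hr ▸ List.mem_cons_of_mem a h2))


theorem pv_prefix_head : ∀ (p s h0 : List Char) (t : List (List Char)),
    p <+: s → ('\n' ∉ p) → pvSplitNl s = h0 :: t → p <+: h0 := by
  intro p
  induction p with
  | nil => intro s h0 t _ _ _; exact List.nil_prefix
  | cons d p' ih =>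
    intro s h0 t hp hn hs
    cases s with
    | nil => exact absurd (List.prefix_nil.1 hp) (by simp)
    | cons c rest =>
      obtain ⟨rfl, hp'⟩ : d = c ∧ p' <+: rest := by
        rcases hp with ⟨u, hu⟩
        simp at hu
        exact ⟨hu.1, ⟨u, hu.2⟩⟩
      have hd : ¬ d = '\n' := fun h => hn (by simp [h])
      simp only [pvSplitNl, if_neg hd] at hs
      cases hr : pvSplitNl rest with
      | nil => exact absurd hr (pvSplitNl_ne_nil rest)
      | cons a t' =>
        rw [hr] at hs
        simp at hs
        obtain ⟨rfl, rfl⟩ := hs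
        exact (List.prefix_cons_inj d).mpr (ih rest a t' hp' (fun h => hn (List.mem_cons_of_mem d h)) hr)

theorem pv_exists_line : ∀ (s sub : List Char), ('\n' ∉ sub) → sub <:+: s →
    ∃ l ∈ pvSplitNl s, sub <:+: l := by
  intro s
  induction s with
  | nil =>
    intro sub hn h
    refine ⟨[], by simp [pvSplitNl], ?_⟩
    simp [List.infix_nil.1 h]
  | cons c rest ih =>
    intro sub hn h
    rcases List.infix_cons_iff.1 h with hpre | hinf
    · cases sub with
      | nil =>
        cases he : pvSplitNl (c :: rest) with
        | nil => exact absurd he (pvSplitNl_ne_nil _)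
        | cons a t => exact ⟨a, by simp [he], List.nil_infix⟩
      | cons d sub' =>
        obtain ⟨rfl, hp'⟩ : d = c ∧ sub' <+: rest := by
          rcases hpre with ⟨u, hu⟩
          simp at hu
          exact ⟨hu.1, ⟨u, hu.2⟩⟩
        have hd : ¬ d = '\n' := fun hq => hn (by simp [hq])
        cases hr : pvSplitNl rest with
        | nil => exact absurd hr (pvSplitNl_ne_nil rest)
        | cons a t =>
          refine ⟨d :: a, ?_, ?_⟩
          · simp [pvSplitNl, if_neg hd, hr]
          · exact ((List.prefix_cons_inj d).mpr
              (pv_prefix_head sub' rest a t hp' (fun hq => hn (List.mem_cons_of_mem d hq)) hr)).isInfix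
    · obtain ⟨l, hl, hsl⟩ := ih sub hn hinf
      by_cases hc : c = '\n'
      · exact ⟨l, by simp [pvSplitNl, if_pos hc, hl], hsl⟩
      · cases hr : pvSplitNl rest with
        | nil => exact absurd hr (pvSplitNl_ne_nil rest)
        | cons a t =>
          rw [hr] at hl
          rcases List.mem_cons.1 hl with rfl | h2
          · exact ⟨c :: l, by simp [pvSplitNl, if_neg hc, hr], hsl.trans (by exact ⟨[c], [], by simp⟩)⟩
          · exact ⟨l, by simp [pvSplitNl, if_neg hc, hr, h2], hsl⟩

theorem pv_no_line {sub s : List Char} (h : PySem.Chars.isIn sub s = false) :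
    ∀ l ∈ pvSplitNl s, PySem.Chars.isIn sub l = false := by
  intro l hl
  by_contra hx
  rw [Bool.not_eq_false, PySem.Chars.isIn_iff_infix] at hx
  rw [PySem.Chars.isIn_eq_false_iff] at h
  exact h (hx.trans (pv_mem_infix hl))

theorem pvCountA_skip (ls : List (List Char)) : ∀ (rest : List (List Char)) (cnt : Nat),
    (∀ l ∈ ls, PySem.Chars.isIn pvHdr l = false) →
    pvCountA (ls ++ rest) cnt false = pvCountA rest cnt false := by
  induction ls with
  | nil => intro rest cnt _; rfl
  | cons l ls ih =>
    intro rest cnt h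
    have hl := h l (by simp)
    simp only [List.cons_append, pvCountA, hl]
    simp only [Bool.false_eq_true, if_false, Bool.and_false, Bool.false_and]
    exact ih rest cnt (fun x hx => h x (by simp [hx]))

theorem pvCountA_inSec (ls : List (List Char)) : ∀ (cnt : Nat),
    (∀ l ∈ ls, PySem.Chars.isIn pvPh l = false) →
    pvCountA ls cnt true = cnt + pvCountB ls := by
  induction ls with
  | nil => intro cnt _; simp [pvCountA, pvCountB]
  | cons l ls ih =>
    intro cnt h
    have hph := h l (by simp)
    have hrec := fun c => ih c (fun x hx => h x (by simp [hx]))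
    by_cases h1 : PySem.Chars.isIn pvHdr l
    · simp [pvCountA, pvCountB, h1, hrec cnt]
    · by_cases h2 : PySem.Chars.startswith l pvHash
      · simp [pvCountA, pvCountB, h1, h2]
      · by_cases h3 : PySem.Chars.startswith (PySem.Chars.strip l) pvDash
        · simp [pvCountA, pvCountB, h1, h2, h3, hph, hrec (cnt + 1)]
          omega
        · simp [pvCountA, pvCountB, h1, h2, h3, hrec cnt]

theorem pvFoldA_skip (x : List Char) (pre : List (List Char)) :
    ∀ (rest acc : List (List Char)),
    (∀ l ∈ pre, PySem.Chars.isIn pvHdr l = false) →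
    List.foldl (pvStepA x) (acc, false) (pre ++ rest) = List.foldl (pvStepA x) (acc ++ pre, false) rest := by
  induction pre with
  | nil => intro rest acc _; simp
  | cons l pre ih =>
    intro rest acc h
    have hl := h l (by simp)
    simp only [List.cons_append, List.foldl_cons]
    rw [show pvStepA x (acc, false) l = (acc ++ [l], false) by simp [pvStepA, hl]]
    rw [ih rest (acc ++ [l]) (fun y hy => h y (by simp [hy]))]
    simp

theorem pvFoldA_done (x : List Char) (ls : List (List Char)) : ∀ (acc : List (List Char)),
    List.foldl (pvStepA x) (acc, true) ls = (acc ++ ls, true) := by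
  induction ls with
  | nil => intro acc; simp
  | cons l ls ih =>
    intro acc
    simp only [List.foldl_cons]
    rw [show pvStepA x (acc, true) l = (acc ++ [l], true) by simp [pvStepA]]
    rw [ih (acc ++ [l])]
    simp


-- ===== main proof =====
theorem pv_main (cc obs tf : String) :
    simple_append_update_py cc obs tf = simple_append_update_py_alt cc obs tf := by
  by_cases h1 : PySem.Str.isIn "[No patterns recorded yet]" cc
  · simp only [simple_append_update_py, simple_append_update_py_alt, if_pos h1]
  · simp only [simple_append_update_py, simple_append_update_py_alt, if_neg h1, pv_splitOn_eq]
    set L := pvSplitNl cc.toList with hLdef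
    set x := pvDash ++ obs.toList with hxdef
    have h1' : PySem.Chars.isIn pvPh cc.toList = false := by
      rw [Bool.not_eq_true] at h1
      exact (PySem.Str.isIn_eq "[No patterns recorded yet]" cc).symm.trans h1
    have hphL : ∀ l ∈ L, PySem.Chars.isIn pvPh l = false := pv_no_line h1'
    by_cases h2 : PySem.Str.isIn "## Observed Behaviors" cc
    · have h2' : PySem.Chars.isIn pvHdr cc.toList = true := by
        exact (PySem.Str.isIn_eq "## Observed Behaviors" cc).symm.trans h2
      have hinf : pvHdr <:+: cc.toList := (PySem.Chars.isIn_iff_infix _ _).1 h2'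
      obtain ⟨l0, hl0, hsub⟩ := pv_exists_line cc.toList pvHdr (by decide) hinf
      cases hfi : L.findIdx? (fun l => PySem.Chars.isIn pvHdr l) with
      | none =>
        rw [List.findIdx?_eq_none_iff] at hfi
        exact absurd ((PySem.Chars.isIn_iff_infix _ _).2 hsub) (by simp [hfi l0 hl0])
      | some i =>
        obtain ⟨hi, hpi, hprior⟩ := List.findIdx?_eq_some_iff_getElem.1 hfi
        have hdecomp : L = L.take i ++ L[i] :: L.drop (i + 1) := by
          conv_lhs => rw [← List.take_append_drop i L, ← List.getElem_cons_drop hi]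
        have hpre : ∀ l ∈ L.take i, PySem.Chars.isIn pvHdr l = false := by
          intro l hl
          obtain ⟨j, hj, rfl⟩ := List.mem_iff_getElem.1 hl
          have hj' : j < i := by
            have := hj; simp [List.length_take] at this; omega
          rw [List.getElem_take]
          exact Bool.not_eq_true _ ▸ (by simpa using hprior j hj')
        have hpost : ∀ l ∈ L.drop (i + 1), PySem.Chars.isIn pvPh l = false := by
          intro l hl
          exact hphL l (List.mem_of_mem_drop hl)
        have hcnt : pvCountA L 0 false = pvCountB (L.drop (i + 1)) := by
          conv_lhs => rw [hdecomp]
          rw [pvCountA_skip (L.take i) (L[i] :: L.drop (i + 1)) 0 hpre]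
          simp only [pvCountA, hpi, if_pos]
          simpa using pvCountA_inSec (L.drop (i + 1)) 0 hpost
        simp only [hcnt]
        by_cases h5 : pvCountB (L.drop (i + 1)) < 5
        · rw [if_pos h5, if_pos h2, if_pos h5]
          have ht : List.take (i + 1) L = List.take i L ++ [L[i]] := by
            rw [List.take_add_one]
            simp [List.getElem?_eq_getElem hi]
          have hfold : (List.foldl (pvStepA x) ([], false) L).1
              = L.take i ++ L[i] :: x :: L.drop (i + 1) := by
            conv_lhs => rw [hdecomp]
            rw [pvFoldA_skip x (L.take i) (L[i] :: L.drop (i + 1)) [] hpre]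
            simp only [List.foldl_cons, List.nil_append]
            rw [show pvStepA x (L.take i, false) L[i]
                  = ((L.take i ++ [L[i]]) ++ [x], true) by simp [pvStepA, hpi]]
            rw [pvFoldA_done]
            simp only [List.append_assoc, List.singleton_append, List.cons_append,
              List.nil_append]
          have hins : PySem.List.insert L ((i : Int) + 1) x
              = L.take i ++ L[i] :: x :: L.drop (i + 1) := by
            have hcast : ((i : Int) + 1) = (((i + 1 : Nat)) : Int) := by push_cast; ring
            rw [hcast, PySem.List.insert_natCast L (i + 1) x (by omega), ht]
            simp only [List.append_assoc, List.singleton_append]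
          rw [hfold, hins]
        · rw [if_neg h5, if_neg h5]
    · have h2' : PySem.Chars.isIn pvHdr cc.toList = false := by
        rw [Bool.not_eq_true] at h2
        exact (PySem.Str.isIn_eq "## Observed Behaviors" cc).symm.trans h2
      have hnol : ∀ l ∈ L, PySem.Chars.isIn pvHdr l = false := pv_no_line h2'
      have hcnt : pvCountA L 0 false = 0 := by
        have := pvCountA_skip L [] 0 hnol
        simpa [pvCountA] using this
      have hfind : L.findIdx? (fun l => PySem.Chars.isIn pvHdr l) = none :=
        List.findIdx?_eq_none_iff.2 (by simpa using hnol)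
      rw [hcnt, hfind, if_pos (by omega : (0:Nat) < 5), if_neg h2]

-- ===== VERDICT (by name: the statement is the Claim_ definition above) =====
theorem simple_append_update_py_spec : Claim_equal_simple_append_update_py := by
  intro cc obs tf _
  unfold Spec_simple_append_update_py
  exact pv_main cc obs tf
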